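-- pv_equiv track=rewrite | github.com/kgw012/GUMI1_ALGO_STUDY | 210809_stackNQueue/GilWoong/problem/function_development.py | solution
-- ===== SOURCE A (Python) =====
-- from collections import deque
-- import math
--
-- def solution(progresses, speeds):
--
--     p_que = deque(progresses)
--     s_que = deque(speeds)
--
--
--     time = 0
--     answer = []
--
--     while len(p_que):
--         time = math.ceil((100 - p_que[0]) / s_que[0])
--
--         cnt = 0
--         while len(p_que)  and  100 - p_que[0] <= s_que[0] * time:
--             p_que.popleft()
--             s_que.popleft()
--             cnt += 1
--
--         answer.append(cnt)
--     return answer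
-- ===== SOURCE B (Python) =====
-- import math
--
-- def solution(progresses, speeds):
--     days = [math.ceil((100 - p) / s) for p, s in zip(progresses, speeds)]
--     answer = []
--     i = 0
--     n = len(days)
--     while i < n:
--         threshold = days[i]
--         j = i + 1
--         while j < n and days[j] <= threshold:
--             j += 1
--         answer.append(j - i)
--         i = j
--     return answer
-- ===== Notes on version B (the rewrite author's own statement) =====
-- stated objective: simpler
-- what changed: B precomputes the finish day of every task once (ceil division) and groups them in a single index pass over that list, instead of A's two deques popped element by element with the multiply-form condition re-evaluated inside a nested while.
-- outside the precondition, e.g. on solution([99, 105], [1, -2]): A returns [2], B returns [1, 1]; on solution([99, 100], [1, 0]): A returns [2], B raises ZeroDivisionError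
import Mathlib
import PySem

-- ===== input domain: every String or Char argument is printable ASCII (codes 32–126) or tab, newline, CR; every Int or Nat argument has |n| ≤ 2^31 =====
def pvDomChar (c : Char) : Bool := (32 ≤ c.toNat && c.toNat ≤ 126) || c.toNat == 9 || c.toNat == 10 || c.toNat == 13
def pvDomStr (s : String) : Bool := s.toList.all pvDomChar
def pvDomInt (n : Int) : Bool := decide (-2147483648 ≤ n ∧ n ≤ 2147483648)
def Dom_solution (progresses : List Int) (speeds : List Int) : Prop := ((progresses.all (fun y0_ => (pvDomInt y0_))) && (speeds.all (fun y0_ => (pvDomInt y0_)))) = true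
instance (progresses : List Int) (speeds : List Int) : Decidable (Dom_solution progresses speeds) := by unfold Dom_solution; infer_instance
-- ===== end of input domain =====

-- B replaces A's two popped deques and nested multiply-form while by a precomputed finish-day
-- list grouped in one index pass (simpler decomposition, same O(n) cost).


-- ===== PORT A =====
-- math.ceil((100 - p) / s) : exact on Dom (|ints| ≤ 2^31, so the float quotient cannot
-- round across an integer); ported as exact ceiling division -((-x) // s).
def ceilDiv (x s : Int) : Int := -(PySem.Int.floordiv (-x) s)

-- inner `while len(p_que) and 100 - p_que[0] <= s_que[0]*time` : pops both queues, counts.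
-- (if p_que is nonempty while s_que is empty Python raises IndexError — outside Pre_.)
def solAInner : List Int → List Int → Int → Int → Int × List Int × List Int
  | p :: ps, s :: ss, t, cnt =>
      if 100 - p ≤ s * t then solAInner ps ss t (cnt + 1)
      else (cnt, p :: ps, s :: ss)
  | ps, ss, _, cnt => (cnt, ps, ss)

-- outer `while len(p_que)` : fuel = initial length totalises it (with Pre_ each round pops ≥ 1)
def solALoop : Nat → List Int → List Int → List Int → List Int
  | 0, _, _, acc => acc.reverse
  | fuel + 1, p, s, acc =>
      match p, s with
      | p0 :: _, s0 :: _ =>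
          let t := ceilDiv (100 - p0) s0
          let r := solAInner p s t 0
          solALoop fuel r.2.1 r.2.2 (r.1 :: acc)
      | _, _ => acc.reverse

def solution (progresses : List Int) (speeds : List Int) : List Int :=
  solALoop progresses.length progresses speeds []

-- ===== PORT B =====
-- days = [math.ceil((100 - p) / s) for p, s in zip(progresses, speeds)]
def daysB (progresses : List Int) (speeds : List Int) : List Int :=
  (progresses.zip speeds).map (fun q => ceilDiv (100 - q.1) q.2)

-- single pass: threshold = head, advance j over the consecutive entries ≤ threshold
-- (the inner `while j < n and days[j] <= threshold` is exactly takeWhile/dropWhile on the rest)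
def groupB : List Int → List Int
  | [] => []
  | d :: ds =>
      (((ds.takeWhile (fun x => decide (x ≤ d))).length : Int) + 1)
        :: groupB (ds.dropWhile (fun x => decide (x ≤ d)))
  termination_by l => l.length
  decreasing_by
    simpa using Nat.lt_succ_of_le (ds.length_dropWhile_le _)

def solution_alt (progresses : List Int) (speeds : List Int) : List Int :=
  groupB (daysB progresses speeds)

-- ===== PRECONDITION & SPEC =====
-- Pre_ restricts to the task's natural domain: every speed actually consumed is positive and
-- exists. It excludes A's crashes (ZeroDivisionError on a zero speed heading a group,
-- IndexError when speeds is shorter than progresses), A's divergence on negative group-head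
-- speeds, and the nonsensical nonpositive-speed corners on which A still happens to return
-- (a zero/negative speed absorbed into an earlier group).
def Pre_solution (progresses : List Int) (speeds : List Int) : Prop :=
  progresses.length ≤ speeds.length ∧ ∀ x ∈ speeds.take progresses.length, 0 < x
instance (progresses : List Int) (speeds : List Int) : Decidable (Pre_solution progresses speeds) := by unfold Pre_solution; infer_instance

def pvWitness_solution : List Int × List Int := ([93, 30, 55], [1, 30, 5])

def Spec_solution (progresses : List Int) (speeds : List Int) (out : List Int) : Prop := out = solution_alt progresses speeds
instance (progresses : List Int) (speeds : List Int) (out : List Int) : Decidable (Spec_solution progresses speeds out) := by unfold Spec_solution; infer_instance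

-- ===== CLAIM (what is proved, stated in full; the proofs are below) =====
def Claim_equal_solution : Prop := ∀ (progresses : List Int) (speeds : List Int), Dom_solution progresses speeds → Pre_solution progresses speeds → Spec_solution progresses speeds (solution progresses speeds)

-- ===== LEMMAS AND PROOFS =====

lemma ceilDiv_le_iff (x s t : Int) (hs : 0 < s) : ceilDiv x s ≤ t ↔ x ≤ s * t := by
  unfold ceilDiv
  rw [neg_le, PySem.Int.le_floordiv_iff_mul_le hs]
  constructor <;> intro h <;> nlinarith

lemma daysB_drop (n : Nat) : ∀ (p s : List Int), daysB (p.drop n) (s.drop n) = (daysB p s).drop n := by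
  induction n with
  | zero => simp
  | succ n ih =>
      intro p s
      cases p with
      | nil => simp [daysB]
      | cons p0 ps =>
          cases s with
          | nil => simp [daysB]
          | cons s0 ss => simpa [daysB] using ih ps ss

lemma dropWhile_eq_drop (f : Int → Bool) (l : List Int) :
    l.dropWhile f = l.drop (l.takeWhile f).length := by
  induction l with
  | nil => simp
  | cons a l ih =>
      by_cases h : f a = true
      · simp [h, ih]
      · simp [h]

lemma pos_drop (k : Nat) (ps ss : List Int) (hk : k ≤ ps.length)
    (hpos : ∀ x ∈ ss.take ps.length, 0 < x) :
    ∀ x ∈ (ss.drop k).take ((ps.drop k).length), 0 < x := by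
  intro x hx
  apply hpos
  have hm : (ps.drop k).length = ps.length - k := by simp
  rw [hm, List.take_drop] at hx
  have h1 : x ∈ ss.take (k + (ps.length - k)) := List.mem_of_mem_drop hx
  have h2 : k + (ps.length - k) = ps.length := by omega
  rwa [h2] at h1

lemma solAInner_eq : ∀ (p s : List Int) (t c : Int),
    p.length ≤ s.length → (∀ x ∈ s.take p.length, 0 < x) →
    solAInner p s t c =
      (c + (((daysB p s).takeWhile (fun x => decide (x ≤ t))).length : Int),
       p.drop ((daysB p s).takeWhile (fun x => decide (x ≤ t))).length,
       s.drop ((daysB p s).takeWhile (fun x => decide (x ≤ t))).length) := by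
  intro p
  induction p with
  | nil => intro s t c _ _; simp [solAInner, daysB]
  | cons p0 ps ih =>
      intro s t c hlen hpos
      cases s with
      | nil => simp at hlen
      | cons s0 ss =>
          have hs0 : 0 < s0 := hpos s0 (by simp)
          have hcond : (100 - p0 ≤ s0 * t) ↔ ceilDiv (100 - p0) s0 ≤ t :=
            (ceilDiv_le_iff _ _ _ hs0).symm
          by_cases h : 100 - p0 ≤ s0 * t
          · have hd : ceilDiv (100 - p0) s0 ≤ t := hcond.mp h
            have e1 : solAInner (p0 :: ps) (s0 :: ss) t c = solAInner ps ss t (c + 1) := by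
              simp [solAInner, h]
            have e2 := ih ss t (c + 1) (by simpa using hlen)
              (fun x hx => hpos x (List.mem_cons_of_mem _ hx))
            rw [e1, e2]
            simp only [daysB, List.zip_cons_cons, List.map_cons, List.takeWhile_cons,
              decide_eq_true hd]
            refine congrArg₂ Prod.mk ?_ rfl
            push_cast [List.length_cons]; ring
          · have hd : ¬ ceilDiv (100 - p0) s0 ≤ t := fun hh => h (hcond.mpr hh)
            simp [solAInner, h, daysB, hd]

lemma solALoop_eq : ∀ (fuel : Nat) (p s acc : List Int),
    p.length ≤ fuel → p.length ≤ s.length → (∀ x ∈ s.take p.length, 0 < x) →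
    solALoop fuel p s acc = acc.reverse ++ groupB (daysB p s) := by
  intro fuel
  induction fuel with
  | zero =>
      intro p s acc hf _ _
      have : p = [] := List.eq_nil_of_length_eq_zero (Nat.le_zero.mp hf)
      subst this; simp [solALoop, daysB, groupB]
  | succ fuel ih =>
      intro p s acc hf hlen hpos
      cases p with
      | nil => simp [solALoop, daysB, groupB]
      | cons p0 ps =>
          cases s with
          | nil => simp at hlen
          | cons s0 ss =>
              have hs0 : 0 < s0 := hpos s0 (by simp)
              have hinner := solAInner_eq (p0 :: ps) (s0 :: ss) (ceilDiv (100 - p0) s0) 0 hlen hpos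
              have hdhead : ceilDiv (100 - p0) s0 ≤ ceilDiv (100 - p0) s0 := le_rfl
              have hdays : daysB (p0 :: ps) (s0 :: ss)
                  = ceilDiv (100 - p0) s0 :: daysB ps ss := by simp [daysB]
              have htw : ((daysB (p0 :: ps) (s0 :: ss)).takeWhile
                  (fun x => decide (x ≤ ceilDiv (100 - p0) s0))).length
                  = ((daysB ps ss).takeWhile
                      (fun x => decide (x ≤ ceilDiv (100 - p0) s0))).length + 1 := by
                rw [hdays]; simp
              have hk'ps : ((daysB ps ss).takeWhile
                  (fun x => decide (x ≤ ceilDiv (100 - p0) s0))).length ≤ ps.length := by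
                have h1 := (List.takeWhile_sublist
                  (l := daysB ps ss) (fun x => decide (x ≤ ceilDiv (100 - p0) s0))).length_le
                have h2 : (daysB ps ss).length ≤ ps.length := by
                  simp [daysB, List.length_zip]
                omega
              have hstep : solALoop (fuel + 1) (p0 :: ps) (s0 :: ss) acc =
                  solALoop fuel
                    (ps.drop ((daysB ps ss).takeWhile
                      (fun x => decide (x ≤ ceilDiv (100 - p0) s0))).length)
                    (ss.drop ((daysB ps ss).takeWhile
                      (fun x => decide (x ≤ ceilDiv (100 - p0) s0))).length)
                    (((0 : Int) + (((daysB ps ss).takeWhile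
                      (fun x => decide (x ≤ ceilDiv (100 - p0) s0))).length + 1 : Nat)) :: acc) := by
                simp only [solALoop]
                rw [hinner, htw]
                simp
              rw [hstep, ih _ _ _ ?_ ?_ ?_]
              · rw [hdays, groupB]
                rw [dropWhile_eq_drop, ← daysB_drop]
                simp only [List.reverse_cons, List.append_assoc, List.cons_append,
                  List.nil_append]
                congr 2
                push_cast; ring
              · simp only [List.length_drop]
                have : ps.length ≤ fuel := by simpa using hf
                omega
              · simp only [List.length_drop]
                have : ps.length ≤ ss.length := by simpa using hlen
                omega
              · exact pos_drop _ _ _ hk'ps (fun x hx => hpos x (by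
                  simp only [List.length_cons, List.take_succ_cons, List.mem_cons]
                  right; exact hx))

-- ===== VERDICT (by name: the statement is the Claim_ definition above) =====
theorem solution_spec : Claim_equal_solution := by
  intro p s _ hpre
  unfold Spec_solution solution solution_alt
  simpa using solALoop_eq p.length p s [] le_rfl hpre.1 hpre.2
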